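-- pv_equiv track=rewrite | github.com/bradbell/cppad_py | bin/xsrst.py | find_text_line
-- ===== SOURCE A (Python) =====
-- def find_text_line(data, text, exclude=None) :
--     assert len(text) > 0
--     result = list()
--     #
--     if exclude == None :
--         exclude = (0, 0)
--     #
--     index = data.find(text)
--     while 0 <= index :
--         line_number = data[: index].count('\n') + 1
--         if line_number < exclude[0] or exclude[1] < line_number :
--             result.append( line_number )
--         index = data.find(text, index + len(text))
--     return result
-- ===== SOURCE B (Python) =====
-- def find_text_line(data, text, exclude=None):
--     assert len(text) > 0
--     if exclude is None:
--         lo, hi = 0, 0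
--     else:
--         lo, hi = exclude[0], exclude[1]
--     result = []
--     line = 1
--     i = 0
--     n = len(data)
--     m = len(text)
--     while i < n:
--         if data.startswith(text, i):
--             if line < lo or hi < line:
--                 result.append(line)
--             line += data.count('\n', i, i + m)
--             i += m
--         else:
--             if data[i] == '\n':
--                 line += 1
--             i += 1
--     return result
-- ===== Notes on version B (the rewrite author's own statement) =====
-- stated objective: alternative
-- what changed: B makes a single left-to-right pass with a running line counter (checking a prefix match at each position), instead of A's repeated data.find plus recounting all newlines from the start of the string for every match; on the timed inputs this is not faster in CPython because A's find/count run at C speed.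
-- outside the precondition, e.g. on find_text_line('z z', '\nx', ()): A returns [], B raises IndexError
import Mathlib
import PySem

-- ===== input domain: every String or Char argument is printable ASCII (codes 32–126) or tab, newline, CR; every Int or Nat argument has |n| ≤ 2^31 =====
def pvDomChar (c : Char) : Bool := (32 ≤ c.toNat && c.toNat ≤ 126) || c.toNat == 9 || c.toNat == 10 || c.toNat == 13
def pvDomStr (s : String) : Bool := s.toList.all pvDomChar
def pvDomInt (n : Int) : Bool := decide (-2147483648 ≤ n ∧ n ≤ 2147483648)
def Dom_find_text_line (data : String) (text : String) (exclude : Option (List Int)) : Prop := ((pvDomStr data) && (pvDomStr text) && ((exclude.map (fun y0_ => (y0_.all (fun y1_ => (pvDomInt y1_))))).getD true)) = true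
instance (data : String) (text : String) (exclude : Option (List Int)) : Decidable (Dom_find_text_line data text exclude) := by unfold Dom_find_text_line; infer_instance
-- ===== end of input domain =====

-- Alternative algorithm: B is a single left-to-right scan with a running line counter;
-- A repeatedly calls find and recounts all newlines from the start of the string at every match.

-- ===== PORT A =====
-- A's while loop; fuel (s.length + 1) is only a totality guard, never exhausted when text ≠ [].
def pvLoopA (s t : List Char) (lo hi : Int) : Nat → Int → List Int → List Int
  | 0, _, acc => acc
  | fuel + 1, index, acc =>
    if 0 ≤ index then
      let line : Int := ((PySem.List.slice s none (some index)).count '\n' : Int) + 1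
      let acc' := if line < lo ∨ hi < line then acc ++ [line] else acc
      pvLoopA s t lo hi fuel (PySem.Chars.findFrom s t (index + (t.length : Int)) none) acc'
    else acc

def find_text_line (data : String) (text : String) (exclude : Option (List Int)) : List Int :=
  let s := data.toList
  let t := text.toList
  let ex : Int × Int :=
    match exclude with
    | none => (0, 0)
    | some l => ((PySem.List.pyGet? l 0).getD 0, (PySem.List.pyGet? l 1).getD 0)
  pvLoopA s t ex.1 ex.2 (s.length + 1) (PySem.Chars.find s t) []

-- ===== PORT B =====
-- B's while loop: one pass over s, line = running 1-based line number (t = c0 :: tr).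
def pvScanB (c0 : Char) (tr : List Char) (lo hi : Int) (s : List Char) (line : Int) : List Int :=
  if h : PySem.Chars.startswith s (c0 :: tr) then
    (if line < lo ∨ hi < line then [line] else []) ++
      pvScanB c0 tr lo hi (s.drop (tr.length + 1))
        (line + ((s.take (tr.length + 1)).count '\n' : Int))
  else
    match s with
    | [] => []
    | c :: rest => pvScanB c0 tr lo hi rest (if c = '\n' then line + 1 else line)
termination_by s.length
decreasing_by
  · have hp : (c0 :: tr) <+: s := (PySem.Chars.startswith_iff _ _).mp h
    have := hp.length_le
    simp at this ⊢
    omega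
  · simp

def find_text_line_alt (data : String) (text : String) (exclude : Option (List Int)) : List Int :=
  let s := data.toList
  let ex : Int × Int :=
    match exclude with
    | none => (0, 0)
    | some l => ((PySem.List.pyGet? l 0).getD 0, (PySem.List.pyGet? l 1).getD 0)
  match text.toList with
  | [] => []   -- text = "" fails A's assert; outside Pre_ (totality guard)
  | c0 :: tr => pvScanB c0 tr ex.1 ex.2 s 1

-- ===== PRECONDITION & SPEC =====
-- Pre_ excludes empty text (A's assert raises) and exclude lists with fewer than two
-- elements: there A raises IndexError on exclude[0]/exclude[1] whenever text occurs in data,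
-- and returns [] only accidentally (the subscript is never reached) when there is no match;
-- B reads exclude[0]/exclude[1] up front and raises on all such lists.
def Pre_find_text_line (data : String) (text : String) (exclude : Option (List Int)) : Prop :=
  text ≠ "" ∧ 2 ≤ (exclude.getD [0, 0]).length
instance (data : String) (text : String) (exclude : Option (List Int)) : Decidable (Pre_find_text_line data text exclude) := by unfold Pre_find_text_line; infer_instance

def pvWitness_find_text_line : String × String × Option (List Int) := ("a\nb a", "a", none)

def Spec_find_text_line (data : String) (text : String) (exclude : Option (List Int)) (out : List Int) : Prop := out = find_text_line_alt data text exclude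
instance (data : String) (text : String) (exclude : Option (List Int)) (out : List Int) : Decidable (Spec_find_text_line data text exclude out) := by unfold Spec_find_text_line; infer_instance

-- ===== CLAIM (what is proved, stated in full; the proofs are below) =====
def Claim_equal_find_text_line : Prop := ∀ (data : String) (text : String) (exclude : Option (List Int)), Dom_find_text_line data text exclude → Pre_find_text_line data text exclude → Spec_find_text_line data text exclude (find_text_line data text exclude)

-- ===== LEMMAS AND PROOFS =====

-- If t never occurs in u, the scan walks to the end and emits nothing.
lemma scan_no_match (c0 : Char) (tr : List Char) (lo hi : Int) :
    ∀ (u : List Char) (line : Int), ¬ (c0 :: tr) <:+: u →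
      pvScanB c0 tr lo hi u line = [] := by
  intro u
  induction u with
  | nil =>
    intro line h
    rw [pvScanB]
    simp [PySem.Chars.startswith_iff]
  | cons c rest ih =>
    intro line h
    have h1 : ¬ PySem.Chars.startswith (c :: rest) (c0 :: tr) = true := by
      rw [PySem.Chars.startswith_iff]
      exact fun hp => h hp.isInfix
    rw [pvScanB]
    simp only [h1]
    exact ih _ (fun hi => h (List.infix_cons hi))

-- Over a stretch with no match, the scan just advances the running line counter.
lemma scan_skip (c0 : Char) (tr : List Char) (lo hi : Int) (s : List Char) :
    ∀ (n k : Nat), k + n ≤ s.length →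
      (∀ i, k ≤ i → i < k + n → ¬ (c0 :: tr) <+: s.drop i) →
      pvScanB c0 tr lo hi (s.drop k) (((s.take k).count '\n' : Int) + 1)
        = pvScanB c0 tr lo hi (s.drop (k + n)) (((s.take (k + n)).count '\n' : Int) + 1) := by
  intro n
  induction n with
  | zero => intro k _ _; rfl
  | succ n ih =>
    intro k hlen hno
    have hk : k < s.length := by omega
    have h1 : ¬ PySem.Chars.startswith (s.drop k) (c0 :: tr) = true := by
      rw [PySem.Chars.startswith_iff]
      exact hno k le_rfl (by omega)
    have hdk : s.drop k = s[k] :: s.drop (k + 1) := List.drop_eq_getElem_cons hk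
    have hstep : pvScanB c0 tr lo hi (s.drop k) (((s.take k).count '\n' : Int) + 1)
        = pvScanB c0 tr lo hi (s.drop (k + 1)) (((s.take (k + 1)).count '\n' : Int) + 1) := by
      have h1' : ¬ PySem.Chars.startswith (s[k] :: s.drop (k + 1)) (c0 :: tr) = true :=
        hdk ▸ h1
      rw [hdk, pvScanB]
      simp only [h1']
      have htk : s.take (k + 1) = s.take k ++ [s[k]] := by
        rw [List.take_add_one]
        simp [List.getElem?_eq_getElem hk]
      rw [htk, List.count_append]
      by_cases hc : s[k] = '\n' <;> simp [hc]
    rw [hstep]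
    have := ih (k + 1) (by omega) (fun i h1 h2 => hno i (by omega) (by omega))
    rw [show k + 1 + n = k + (n + 1) by omega] at this
    exact this

-- Main invariant: A's find-driven loop from search position k equals B's scan of the suffix.
lemma loop_eq_scan (c0 : Char) (tr : List Char) (lo hi : Int) (s : List Char) :
    ∀ (fuel k : Nat) (acc : List Int), k ≤ s.length → s.length + 1 - k ≤ fuel →
      pvLoopA s (c0 :: tr) lo hi fuel (PySem.Chars.findFrom s (c0 :: tr) (k : Int) none) acc
        = acc ++ pvScanB c0 tr lo hi (s.drop k) (((s.take k).count '\n' : Int) + 1) := by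
  intro fuel
  induction fuel with
  | zero => intro k acc hk hf; omega
  | succ fuel ih =>
    intro k acc hk hf
    by_cases hne : PySem.Chars.findFrom s (c0 :: tr) (k : Int) none = -1
    · -- no further match: the loop exits, the scan walks to the end emitting nothing
      have hno : ¬ (c0 :: tr) <:+: s.drop k :=
        (PySem.Chars.findFrom_natCast_eq_neg_one_iff s (c0 :: tr) k hk).mp hne
      rw [hne, pvLoopA]
      simp only [show ¬ ((0:Int) ≤ -1) by omega, if_neg, not_false_iff]
      rw [scan_no_match c0 tr lo hi _ _ hno, List.append_nil]
    · obtain ⟨hkr, hpre, hfirst⟩ := PySem.Chars.findFrom_natCast_spec s (c0 :: tr) k hk hne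
      set r := PySem.Chars.findFrom s (c0 :: tr) (k : Int) none with hr
      have hr0 : 0 ≤ r := le_trans (by exact_mod_cast Int.natCast_nonneg k) hkr
      set j := r.toNat with hj
      have hrj : r = (j : Int) := (Int.toNat_of_nonneg hr0).symm
      have hkj : k ≤ j := by omega
      have hjlen : j + (tr.length + 1) ≤ s.length := by
        have := hpre.length_le
        simp only [List.length_cons, List.length_drop] at this
        omega
      -- one step of A's loop
      rw [pvLoopA]
      simp only [if_pos hr0]
      have hslice : PySem.List.slice s none (some r) = s.take j :=
        PySem.List.slice_to _ hr0
      have hcast : r + ((c0 :: tr).length : Int) = ((j + (tr.length + 1) : Nat) : Int) := by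
        rw [hrj]; push_cast; simp
      rw [hslice, hcast]
      have hih := ih (j + (tr.length + 1))
        (if ((s.take j).count '\n' : Int) + 1 < lo ∨ hi < ((s.take j).count '\n' : Int) + 1
          then acc ++ [((s.take j).count '\n' : Int) + 1] else acc)
        hjlen (by omega)
      rw [hih]
      -- B's scan: skip the no-match stretch, then take the match step
      have hskip := scan_skip c0 tr lo hi s (j - k) k (by omega)
        (fun i h1 h2 => hfirst i (by exact_mod_cast Int.ofNat_le.mpr h1) (by omega))
      rw [show k + (j - k) = j by omega] at hskip
      rw [hskip]
      have hsw : PySem.Chars.startswith (s.drop j) (c0 :: tr) = true :=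
        (PySem.Chars.startswith_iff _ _).mpr hpre
      conv_rhs => rw [pvScanB]
      simp only [hsw, dif_pos]
      have hdd : (s.drop j).drop (tr.length + 1) = s.drop (j + (tr.length + 1)) := by
        rw [List.drop_drop, Nat.add_comm]
      have htt : s.take (j + (tr.length + 1)) = s.take j ++ (s.drop j).take (tr.length + 1) := by
        rw [← List.take_add]
      have hcnt : ((s.take j).count '\n' : Int) + 1 + (((s.drop j).take (tr.length + 1)).count '\n' : Int)
          = ((s.take (j + (tr.length + 1))).count '\n' : Int) + 1 := by
        rw [htt, List.count_append]; push_cast; ring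
      rw [hdd, hcnt]
      split_ifs <;> simp

-- ===== VERDICT (by name: the statement is the Claim_ definition above) =====
theorem find_text_line_spec : Claim_equal_find_text_line := by
  intro data text exclude _ hpre
  obtain ⟨ht, -⟩ := hpre
  unfold Spec_find_text_line
  cases htl : text.toList with
  | nil => exact absurd (by cases text; simp_all) ht
  | cons c0 tr =>
    have key : ∀ lo hi : Int,
        pvLoopA data.toList (c0 :: tr) lo hi (data.toList.length + 1)
            (PySem.Chars.find data.toList (c0 :: tr)) []
          = pvScanB c0 tr lo hi data.toList 1 := by
      intro lo hi
      have h := loop_eq_scan c0 tr lo hi data.toList (data.toList.length + 1) 0 []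
        (Nat.zero_le _) (by omega)
      rw [Nat.cast_zero, PySem.Chars.findFrom_zero] at h
      simpa using h
    cases exclude with
    | none =>
      simp only [find_text_line, find_text_line_alt, htl]
      exact key 0 0
    | some l =>
      simp only [find_text_line, find_text_line_alt, htl]
      exact key _ _
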